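-- pv_equiv track=rewrite | github.com/swachian/algo_project | src/algo_project/c6_binary_search.py | cutting_wood
-- ===== SOURCE A (Python) =====
-- def cutting_wood(heights, k):
--     left, right = 0, max(heights)
--     while left < right:
--         cut_point = left + (right - left) // 2 + 1
--         wood_cut = compute_wood(heights, cut_point)
--         if wood_cut < k:
--             right = cut_point - 1
--         elif wood_cut == k:
--             return cut_point
--         else:
--             left = cut_point
--     return left
--
-- def compute_wood(heights, cut_point):
--     sum = 0
--     for height in heights:
--         if height > cut_point:
--             sum += height - cut_point
--     return sum
-- ===== SOURCE B (Python) =====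
-- def cutting_wood(heights, k):
--     # Sort once and build a prefix-sum table; each wood query is then a
--     # binary search plus constant arithmetic instead of a linear scan.
--     s = sorted(heights)
--     n = len(s)
--     pre = [0]
--     acc = 0
--     for h in s:
--         acc += h
--         pre.append(acc)
--     total = acc
--     left, right = 0, max(heights)
--     while left < right:
--         cut_point = left + (right - left) // 2 + 1
--         # bisect_right(s, cut_point) by hand (no imports in the original module)
--         lo, hi = 0, n
--         while lo < hi:
--             mid = (lo + hi) // 2
--             if s[mid] <= cut_point:
--                 lo = mid + 1
--             else:
--                 hi = mid
--         wood_cut = (total - pre[lo]) - (n - lo) * cut_point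
--         if wood_cut < k:
--             right = cut_point - 1
--         elif wood_cut == k:
--             return cut_point
--         else:
--             left = cut_point
--     return left
-- ===== Notes on version B (the rewrite author's own statement) =====
-- stated objective: alternative
-- what changed: The outer binary search is kept, but the per-iteration linear scan compute_wood is replaced by a one-time sort plus prefix-sum table, each wood query becoming a hand-written bisect_right binary search and constant arithmetic (total - pre[idx] - (n-idx)*cut).
import Mathlib
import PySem

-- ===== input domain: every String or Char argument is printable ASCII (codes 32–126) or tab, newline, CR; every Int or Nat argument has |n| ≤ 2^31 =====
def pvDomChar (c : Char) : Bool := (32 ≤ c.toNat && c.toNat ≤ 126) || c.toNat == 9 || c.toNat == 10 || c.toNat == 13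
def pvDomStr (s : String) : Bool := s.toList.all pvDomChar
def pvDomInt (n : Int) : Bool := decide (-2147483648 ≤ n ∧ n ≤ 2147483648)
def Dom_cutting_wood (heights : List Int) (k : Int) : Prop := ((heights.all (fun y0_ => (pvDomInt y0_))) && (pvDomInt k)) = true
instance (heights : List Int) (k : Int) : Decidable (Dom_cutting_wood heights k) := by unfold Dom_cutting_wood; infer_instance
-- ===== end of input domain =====

-- B replaces the per-iteration linear scan of compute_wood by a one-time sort +
-- prefix-sum table queried with a hand-written binary search (objective: alternative).

-- ===== PORT A =====
-- helper compute_wood: the linear scan 'for height in heights: if height > cut_point: sum += …'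
def compute_wood (heights : List Int) (cut_point : Int) : Int :=
  heights.foldl (fun sum height => if cut_point < height then sum + (height - cut_point) else sum) 0

-- the while-loop of A; fuel bounds the iteration count (each step shrinks right - left,
-- so (right - left).toNat + 1 steps always suffice and the fuel-0 branch is never reached)
def loopA (heights : List Int) (k : Int) (fuel : Nat) (left right : Int) : Int :=
  match fuel with
  | 0 => left
  | fuel + 1 =>
    if left < right then
      let cut_point := left + PySem.Int.floordiv (right - left) 2 + 1
      let wood_cut := compute_wood heights cut_point
      if wood_cut < k then loopA heights k fuel left (cut_point - 1)
      else if wood_cut = k then cut_point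
      else loopA heights k fuel cut_point right
    else left

def cutting_wood (heights : List Int) (k : Int) : Int :=
  match PySem.List.max? heights (fun x => x) with
  | none => 0          -- unreachable: max([]) raises ValueError, excluded by Pre_
  | some m => loopA heights k (m.toNat + 1) 0 m

-- ===== PORT B =====
-- prefix sums: the loop 'for h in s: acc += h; pre.append(acc)'; returns (appended list, final acc)
def buildPre (s : List Int) (acc : Int) : List Int × Int :=
  match s with
  | [] => ([], acc)
  | h :: t =>
    let r := buildPre t (acc + h)
    ((acc + h) :: r.1, r.2)

-- the inner 'while lo < hi' bisect_right loop of B; s[mid] is in range whenever 0 ≤ lo ≤ hi ≤ len(s)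
def bsr (s : List Int) (c : Int) (lo hi : Nat) : Nat :=
  if h : lo < hi then
    let mid := (lo + hi) / 2
    if s.getD mid 0 ≤ c then bsr s c (mid + 1) hi else bsr s c lo mid
  else lo
termination_by hi - lo
decreasing_by all_goals omega

-- the outer while-loop of B, with the same fuel convention as loopA
def loopB (s : List Int) (pre : List Int) (total : Int) (n : Nat) (k : Int)
    (fuel : Nat) (left right : Int) : Int :=
  match fuel with
  | 0 => left
  | fuel + 1 =>
    if left < right then
      let cut_point := left + PySem.Int.floordiv (right - left) 2 + 1
      let lo := bsr s cut_point 0 n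
      let wood_cut := (total - pre.getD lo 0) - ((n : Int) - (lo : Int)) * cut_point
      if wood_cut < k then loopB s pre total n k fuel left (cut_point - 1)
      else if wood_cut = k then cut_point
      else loopB s pre total n k fuel cut_point right
    else left

def cutting_wood_alt (heights : List Int) (k : Int) : Int :=
  let s := PySem.List.sorted heights (fun x => x)
  let n := s.length
  let r := buildPre s 0
  let pre := 0 :: r.1
  let total := r.2
  match PySem.List.max? heights (fun x => x) with
  | none => 0          -- unreachable: max([]) raises ValueError, excluded by Pre_
  | some m => loopB s pre total n k (m.toNat + 1) 0 m

-- ===== PRECONDITION & SPEC =====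
-- A raises ValueError on the empty list (max([])); both versions are total elsewhere.
def Pre_cutting_wood (heights : List Int) (k : Int) : Prop := heights ≠ []
instance (heights : List Int) (k : Int) : Decidable (Pre_cutting_wood heights k) := by
  unfold Pre_cutting_wood; infer_instance
def pvWitness_cutting_wood : List Int × Int := ([2, 4, 5, 1], 4)

def Spec_cutting_wood (heights : List Int) (k : Int) (out : Int) : Prop := out = cutting_wood_alt heights k
instance (heights : List Int) (k : Int) (out : Int) : Decidable (Spec_cutting_wood heights k out) := by unfold Spec_cutting_wood; infer_instance

-- ===== CLAIM (what is proved, stated in full; the proofs are below) =====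
def Claim_equal_cutting_wood : Prop := ∀ (heights : List Int) (k : Int), Dom_cutting_wood heights k → Pre_cutting_wood heights k → Spec_cutting_wood heights k (cutting_wood heights k)

-- ===== LEMMAS AND PROOFS =====

-- compute_wood is the sum of the clipped differences
theorem compute_wood_eq_sum (heights : List Int) (c : Int) :
    compute_wood heights c
      = (heights.map (fun h => if c < h then h - c else 0)).sum := by
  unfold compute_wood
  rw [PySem.List.foldl_congr_mem
    (g := fun acc h => acc + (if c < h then h - c else 0))
    (h := by intro acc x _; by_cases hcx : c < x <;> simp [hcx])]
  rw [PySem.List.foldl_add]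
  simp

-- prefix-sum table: second component is the running total
theorem buildPre_snd (s : List Int) (acc : Int) :
    (buildPre s acc).2 = acc + s.sum := by
  induction s generalizing acc with
  | nil => simp [buildPre]
  | cons h t ih => simp [buildPre, ih]; ring

-- prefix-sum table: entry i is the sum of the first i elements
theorem buildPre_getD (s : List Int) (acc : Int) (i : Nat) (hi : i ≤ s.length) :
    (acc :: (buildPre s acc).1).getD i 0 = acc + (s.take i).sum := by
  induction s generalizing acc i with
  | nil =>
    have : i = 0 := by simpa using hi
    subst this; simp
  | cons h t ih =>
    cases i with
    | zero => simp
    | succ j =>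
      have := ih (acc + h) j (by simpa using hi)
      simp [buildPre] at this ⊢
      rw [this]; ring

-- binary-search invariant: bsr returns the first index whose element exceeds c
theorem bsr_spec (s : List Int) (c : Int) (lo hi : Nat)
    (hhi : hi ≤ s.length) (hlohi : lo ≤ hi)
    (hmono : ∀ p q : Nat, (hp : p < s.length) → (hq : q < s.length) → p ≤ q → s[p] ≤ s[q])
    (hlow : ∀ j : Nat, j < lo → (hj : j < s.length) → s[j] ≤ c)
    (hhigh : ∀ j : Nat, hi ≤ j → (hj : j < s.length) → c < s[j]) :
    lo ≤ bsr s c lo hi ∧ bsr s c lo hi ≤ hi ∧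
      (∀ j : Nat, j < bsr s c lo hi → (hj : j < s.length) → s[j] ≤ c) ∧
      (∀ j : Nat, bsr s c lo hi ≤ j → (hj : j < s.length) → c < s[j]) := by
  by_cases h : lo < hi
  · have hmid : (lo + hi) / 2 < s.length := by omega
    rw [bsr]
    simp only [dif_pos h]
    have hget : s.getD ((lo + hi) / 2) 0 = s[(lo + hi) / 2] := by
      rw [List.getD_eq_getElem?_getD, List.getElem?_eq_getElem hmid]; rfl
    by_cases hc : s.getD ((lo + hi) / 2) 0 ≤ c
    · simp only [if_pos hc]
      have := bsr_spec s c ((lo + hi) / 2 + 1) hi hhi (by omega) hmono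
        (by intro j hj hjs
            have := hmono j ((lo + hi) / 2) hjs hmid (by omega)
            rw [hget] at hc; omega)
        hhigh
      exact ⟨by omega, this.2.1, this.2.2.1, this.2.2.2⟩
    · simp only [if_neg hc]
      have := bsr_spec s c lo ((lo + hi) / 2) (by omega) (by omega) hmono hlow
        (by intro j hj hjs
            have := hmono ((lo + hi) / 2) j hmid hjs hj
            rw [hget] at hc; omega)
      exact ⟨this.1, by omega, this.2.2.1, this.2.2.2⟩
  · rw [bsr]
    simp only [dif_neg h]
    exact ⟨le_refl _, by omega, hlow, by intro j hj hjs; exact hhigh j (by omega) hjs⟩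
termination_by hi - lo
decreasing_by all_goals omega

-- the clipped-difference sum over any list splits at an index separating ≤ c from > c
theorem sum_clip_eq (s : List Int) (c : Int) (idx : Nat) (hidx : idx ≤ s.length)
    (hlow : ∀ j : Nat, j < idx → (hj : j < s.length) → s[j] ≤ c)
    (hhigh : ∀ j : Nat, idx ≤ j → (hj : j < s.length) → c < s[j]) :
    (s.map (fun h => if c < h then h - c else 0)).sum
      = (s.sum - (s.take idx).sum) - ((s.length : Int) - (idx : Int)) * c := by
  have htl : (s.take idx).length = idx := by simp [hidx]
  have h1 : ((s.take idx).map (fun h => if c < h then h - c else 0)).sum = 0 := by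
    apply List.sum_eq_zero
    intro x hx
    simp only [List.mem_map] at hx
    obtain ⟨y, hy, rfl⟩ := hx
    obtain ⟨j, hj, rfl⟩ := List.mem_iff_getElem.mp hy
    rw [htl] at hj
    have hjs : j < s.length := by omega
    have hgt : (s.take idx)[j]'(by omega) = s[j] := List.getElem_take
    rw [hgt]
    have := hlow j hj hjs
    simp [not_lt.mpr this]
  have h2 : ((s.drop idx).map (fun h => if c < h then h - c else 0)).sum
      = (s.drop idx).sum - ((s.drop idx).length : Int) * c := by
    have hall : ∀ x ∈ s.drop idx, (if c < x then x - c else 0) = x - c := by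
      intro x hx
      obtain ⟨j, hj, rfl⟩ := List.mem_iff_getElem.mp hx
      have hjs : idx + j < s.length := by simp at hj; omega
      have hgt : (s.drop idx)[j] = s[idx + j] := List.getElem_drop
      rw [hgt]
      have := hhigh (idx + j) (by omega) hjs
      simp [this]
    rw [List.map_congr_left hall]
    induction s.drop idx with
    | nil => simp
    | cons a t ih =>
      simp only [List.map_cons, List.sum_cons, List.length_cons, ih]
      push_cast; ring
  have key : (s.map (fun h => if c < h then h - c else 0)).sum
      = ((s.take idx).map (fun h => if c < h then h - c else 0)).sum
        + ((s.drop idx).map (fun h => if c < h then h - c else 0)).sum := by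
    rw [← List.sum_append, ← List.map_append, List.take_append_drop]
  have hds : (s.take idx).sum + (s.drop idx).sum = s.sum := by
    rw [← List.sum_append, List.take_append_drop]
  have hdl : ((s.drop idx).length : Int) = (s.length : Int) - idx := by
    simp; omega
  rw [key, h1, h2, hdl]
  have : (s.drop idx).sum = s.sum - (s.take idx).sum := by omega
  rw [this]; ring

-- B's table query equals A's linear scan, for every cut point
theorem query_eq_compute_wood (heights : List Int) (c : Int) :
    (let s := PySem.List.sorted heights (fun x => x)
     let lo := bsr s c 0 s.length
     ((buildPre s 0).2 - (0 :: (buildPre s 0).1).getD lo 0)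
       - ((s.length : Int) - (lo : Int)) * c)
      = compute_wood heights c := by
  set s := PySem.List.sorted heights (fun x => x) with hs
  have hmono : ∀ p q : Nat, (hp : p < s.length) → (hq : q < s.length) → p ≤ q →
      s[p] ≤ s[q] := by
    intro p q hp hq hpq
    exact PySem.List.sorted_id_getElem_mono (xs := heights) hpq hq
  have hspec := bsr_spec s c 0 s.length (le_refl _) (Nat.zero_le _) hmono
    (by omega) (by omega)
  set lo := bsr s c 0 s.length with hlo
  have hle : lo ≤ s.length := hspec.2.1
  simp only
  rw [buildPre_snd, buildPre_getD s 0 lo hle, compute_wood_eq_sum]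
  have hperm : s.Perm heights := PySem.List.sorted_perm heights (fun x => x) false
  have hsum : (heights.map (fun h => if c < h then h - c else 0)).sum
      = (s.map (fun h => if c < h then h - c else 0)).sum :=
    (List.Perm.sum_eq (List.Perm.map _ hperm)).symm
  rw [hsum, sum_clip_eq s c lo hle hspec.2.2.1 hspec.2.2.2]
  ring

-- the two outer loops agree step for step, since the wood computations agree
theorem loop_eq (heights : List Int) (k : Int) (fuel : Nat) (left right : Int) :
    loopA heights k fuel left right
      = loopB (PySem.List.sorted heights (fun x => x))
          (0 :: (buildPre (PySem.List.sorted heights (fun x => x)) 0).1)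
          (buildPre (PySem.List.sorted heights (fun x => x)) 0).2
          (PySem.List.sorted heights (fun x => x)).length k fuel left right := by
  induction fuel generalizing left right with
  | zero => rfl
  | succ fuel ih =>
    rw [loopA, loopB]
    by_cases h : left < right
    · simp only [if_pos h]
      have hq := query_eq_compute_wood heights
        (left + PySem.Int.floordiv (right - left) 2 + 1)
      simp only at hq
      rw [hq]
      split
      · exact ih left _
      · split
        · rfl
        · exact ih _ right
    · simp only [if_neg h]

-- ===== VERDICT (by name: the statement is the Claim_ definition above) =====
theorem cutting_wood_spec : Claim_equal_cutting_wood := by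
  intro heights k _ _
  unfold Spec_cutting_wood cutting_wood cutting_wood_alt
  cases hm : PySem.List.max? heights (fun x => x) with
  | none => rfl
  | some m => exact loop_eq heights k (m.toNat + 1) 0 m
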